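-- pv_equiv track=rewrite | github.com/Bigizic/NIBO-Test-Network | questions/models.py | change_str_to_list
-- ===== SOURCE A (Python) =====
-- def change_str_to_list(word: str) -> int:
--     """Parse and Changes a string in this format
--         [ words ]
--     to a list
--     Return:
--         - lenth of created list
--     """
--     result = []
--     temp = {}
--     indict = False
--     key = None
--     if word[0] == '[' and word[-1] == ']':
--         for char in word[1:-1]:
--             if char == '{':
--                 indict = True
--                 temp = {}
--             elif char == '}':
--                 indict == False
--                 result.append(temp)
--             elif char in ":," and indict:
--                 continue
--             elif indict:
--                 if key is None:
--                     key = char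
--                 else:
--                     temp[key] = char
--                     key = None
--     return len(result)
-- ===== SOURCE B (Python) =====
-- def change_str_to_list(word: str) -> int:
--     """Closed form: A's loop appends one dict per '}' seen between the
--     brackets, so the answer is just the count of '}' in word[1:-1]."""
--     if word[0] == '[' and word[-1] == ']':
--         return word[1:-1].count('}')
--     return 0
-- ===== Notes on version B (the rewrite author's own statement) =====
-- stated objective: simpler
-- what changed: Replaced the state-machine loop with its temp dict, indict flag and key variable by the closed-form observation that the result length equals the number of '}' characters in word[1:-1], computed with str.count.
import Mathlib
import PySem

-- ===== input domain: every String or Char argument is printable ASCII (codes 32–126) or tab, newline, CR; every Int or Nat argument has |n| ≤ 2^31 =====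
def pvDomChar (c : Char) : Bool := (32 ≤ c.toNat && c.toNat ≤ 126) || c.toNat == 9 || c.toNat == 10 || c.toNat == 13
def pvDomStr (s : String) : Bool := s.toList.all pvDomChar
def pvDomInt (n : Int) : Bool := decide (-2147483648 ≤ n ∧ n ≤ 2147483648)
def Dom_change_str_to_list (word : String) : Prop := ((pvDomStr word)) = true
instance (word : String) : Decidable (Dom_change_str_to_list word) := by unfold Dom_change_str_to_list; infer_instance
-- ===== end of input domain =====

-- B replaces A's state-machine loop (temp dict, indict flag, key slot) by counting '}' in word[1:-1]: simpler, same O(n) cost.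


-- ===== PORT A =====
-- loop state: (result, temp, indict, key); note A's `indict == False` is a no-op comparison, ported as such (indict unchanged)
def pvStepA (st : List (PySem.Dict Char Char) × PySem.Dict Char Char × Bool × Option Char)
    (c : Char) : List (PySem.Dict Char Char) × PySem.Dict Char Char × Bool × Option Char :=
  let (result, temp, indict, key) := st
  if c = '{' then (result, PySem.Dict.empty, true, key)
  else if c = '}' then (result ++ [temp], temp, indict, key)
  else if (c = ':' ∨ c = ',') ∧ indict then (result, temp, indict, key)
  else if indict then
    match key with
    | none => (result, temp, indict, some c)
    | some k => (result, temp.insert k c, indict, none)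
  else (result, temp, indict, key)

def change_str_to_list (word : String) : Int :=
  let init : List (PySem.Dict Char Char) × PySem.Dict Char Char × Bool × Option Char :=
    ([], PySem.Dict.empty, false, none)
  match PySem.Str.pyGet? word 0, PySem.Str.pyGet? word (-1) with
  | some a, some b =>
      if a = '[' ∧ b = ']' then
        (((PySem.List.slice word.toList (some 1) (some (-1))).foldl pvStepA init).1.length : Int)
      else (init.1.length : Int)
  | _, _ => (init.1.length : Int)

-- ===== PORT B =====
def change_str_to_list_alt (word : String) : Int :=
  -- word[0]/word[-1]: IndexError (none) on the empty string is excluded by Pre_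
  if PySem.Str.pyGet? word 0 = some '[' ∧ PySem.Str.pyGet? word (-1) = some ']' then
    ((PySem.Chars.count (PySem.List.slice word.toList (some 1) (some (-1))) ['}'] : Nat) : Int)
  else 0

-- ===== PRECONDITION & SPEC =====
-- Pre_ excludes only the empty string, on which Python A (word[0]) raises IndexError.
def Pre_change_str_to_list (word : String) : Prop := word ≠ ""
instance (word : String) : Decidable (Pre_change_str_to_list word) := by unfold Pre_change_str_to_list; infer_instance
def pvWitness_change_str_to_list : String := "[{a:1}]"

def Spec_change_str_to_list (word : String) (out : Int) : Prop := out = change_str_to_list_alt word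
instance (word : String) (out : Int) : Decidable (Spec_change_str_to_list word out) := by unfold Spec_change_str_to_list; infer_instance

-- ===== CLAIM (what is proved, stated in full; the proofs are below) =====
def Claim_equal_change_str_to_list : Prop := ∀ (word : String), Dom_change_str_to_list word → Pre_change_str_to_list word → Spec_change_str_to_list word (change_str_to_list word)

-- ===== LEMMAS AND PROOFS =====

-- A's loop appends to `result` exactly on '}' characters
theorem pvStepA_length (cs : List Char) :
    ∀ st : List (PySem.Dict Char Char) × PySem.Dict Char Char × Bool × Option Char,
    ((cs.foldl pvStepA st).1).length = st.1.length + cs.count '}' := by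
  induction cs with
  | nil => intro st; simp
  | cons c cs ih =>
    intro st
    obtain ⟨result, temp, indict, key⟩ := st
    simp only [List.foldl_cons, List.count_cons]
    by_cases h1 : c = '{'
    · simp [pvStepA, h1, ih]
    · by_cases h2 : c = '}'
      · subst h2; simp [pvStepA, h1, ih]; omega
      · by_cases h3 : (c = ':' ∨ c = ',') ∧ indict
        · simp [pvStepA, h1, h2, h3, ih]
        · by_cases h4 : indict = true
          · have hc : ¬(c = ':' ∨ c = ',') := fun hcc => h3 ⟨hcc, h4⟩
            cases key <;> simp [pvStepA, h1, h2, hc, h4, ih]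
          · simp [pvStepA, h1, h2, h4, ih]

-- substring count of a single character is the character count
theorem pvGoSingle (c : Char) (l : List Char) : ∀ (fuel acc : Nat), l.length ≤ fuel →
    PySem.Chars.count.go [c] fuel l acc = acc + l.count c := by
  induction l with
  | nil => intro fuel acc h; cases fuel <;> simp [PySem.Chars.count.go]
  | cons x xs ih =>
    intro fuel acc h
    cases fuel with
    | zero => simp at h
    | succ n =>
      simp only [PySem.Chars.count.go]
      by_cases hx : x = c
      · subst hx
        simp [List.isPrefixOf, ih n (acc + 1) (by simpa using h)]
        omega
      · simp [List.isPrefixOf, hx, Ne.symm hx, ih n acc (by simpa using h)]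

theorem pvCountSingle (cs : List Char) (c : Char) : PySem.Chars.count cs [c] = cs.count c := by
  simp [PySem.Chars.count, pvGoSingle c cs cs.length 0 le_rfl]

-- ===== VERDICT (by name: the statement is the Claim_ definition above) =====
theorem change_str_to_list_spec : Claim_equal_change_str_to_list := by
  intro word _ _
  unfold Spec_change_str_to_list change_str_to_list change_str_to_list_alt
  cases h0 : PySem.Str.pyGet? word 0 <;> cases h1 : PySem.Str.pyGet? word (-1) <;>
    simp [h0, h1]
  split_ifs with h <;> simp_all [pvStepA_length, pvCountSingle]
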